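-- pv_equiv track=rewrite | github.com/seonjaechoi0307/TIL | Self-Study/Code_Test/School_Programers_Traning/2023-11-25.py | solution
-- ===== SOURCE A (Python) =====
-- def solution(myString):
--
--     # 솔루션 정의
--     # 문자열 myString이 주어집니다.
--     # myString에서 알파벳 "a"가 등장하면 전부 "A"로 변환하고
--     # "A"가 아닌 모든 대문자 알파벳은 소문자 알파벳으로 변환하여 return
--
--     n = len(myString)
--     answer = ''
--
--     for i in range(n) :
--
--         if myString[i] == 'a' or myString[i] == 'A' :
--             answer += myString[i].upper()
--         else :
--             answer += myString[i].lower()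
--
--     return answer
-- ===== SOURCE B (Python) =====
-- def solution(myString):
--     # two-pass whole-string transformation: lowercase everything, then raise every 'a' to 'A'
--     return myString.lower().replace('a', 'A')
-- ===== Notes on version B (the rewrite author's own statement) =====
-- stated objective: simpler
-- what changed: Replaces the index loop with per-character branching and string accumulation by a single expression: lowercase the whole string, then replace every 'a' with 'A'.
import Mathlib
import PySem

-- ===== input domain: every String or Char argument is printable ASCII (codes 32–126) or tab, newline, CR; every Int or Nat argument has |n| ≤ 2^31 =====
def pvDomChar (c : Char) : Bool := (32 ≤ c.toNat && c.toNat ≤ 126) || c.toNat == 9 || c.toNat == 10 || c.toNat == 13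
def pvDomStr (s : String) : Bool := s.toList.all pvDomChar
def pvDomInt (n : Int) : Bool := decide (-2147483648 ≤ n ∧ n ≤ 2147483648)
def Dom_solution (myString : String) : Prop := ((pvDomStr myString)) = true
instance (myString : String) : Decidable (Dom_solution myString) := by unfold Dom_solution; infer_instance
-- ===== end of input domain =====

-- B replaces A's index loop (per-character if/else, string accumulation) with one
-- expression: lowercase the whole string, then replace every 'a' with 'A' (objective: simpler).

-- ===== PORT A =====
def solution (myString : String) : String :=
  let n : Int := PySem.Str.len myString
  let answer : List Char :=
    (PySem.List.pyRange 0 n 1).foldl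
      (fun answer i =>
        let c := PySem.List.pyGetD myString.toList i ' '   -- index always in range in this loop
        if c == 'a' || c == 'A' then answer ++ [PySem.Chars.upperChar c]
        else answer ++ [PySem.Chars.lowerChar c]) []
  String.ofList answer

-- ===== PORT B =====
def solution_alt (myString : String) : String :=
  PySem.Str.replace (PySem.Str.lower myString) "a" "A"

-- ===== PRECONDITION & SPEC =====
def Spec_solution (myString : String) (out : String) : Prop := out = solution_alt myString
instance (myString : String) (out : String) : Decidable (Spec_solution myString out) := by unfold Spec_solution; infer_instance

-- ===== CLAIM (what is proved, stated in full; the proofs are below) =====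
def Claim_equal_solution : Prop := ∀ (myString : String), Dom_solution myString → Spec_solution myString (solution myString)

-- ===== LEMMAS AND PROOFS =====

-- replace with the single-char pattern 'a' is a character map
theorem replace_go_single (fuel : Nat) (l acc : List Char) (h : l.length ≤ fuel) :
    PySem.Chars.replace.go ['a'] ['A'] fuel l acc
      = acc.reverse ++ l.map (fun c => if c = 'a' then 'A' else c) := by
  induction fuel generalizing l acc with
  | zero =>
    have hl : l = [] := by
      cases l with
      | nil => rfl
      | cons c t => simp at h
    subst hl
    simp [PySem.Chars.replace.go]
  | succ fuel ih =>
    cases l with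
    | nil => simp [PySem.Chars.replace.go]
    | cons c t =>
      have ht : t.length ≤ fuel := by
        simp only [List.length_cons] at h; omega
      simp only [PySem.Chars.replace.go]
      by_cases hc : c = 'a'
      · subst hc
        rw [if_pos (by simp [List.isPrefixOf])]
        rw [show List.drop (['a'] : List Char).length ('a' :: t) = t from rfl]
        rw [ih t _ ht]
        simp
      · have hp : List.isPrefixOf ['a'] (c :: t) = false := by
          simp only [List.isPrefixOf, Bool.and_true]
          exact beq_eq_false_iff_ne.mpr (fun h' => hc h'.symm)
        rw [if_neg (by simp [hp])]
        rw [ih t _ ht]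
        simp [hc]

theorem replace_single (l : List Char) :
    PySem.Chars.replace l ['a'] ['A'] = l.map (fun c => if c = 'a' then 'A' else c) := by
  rw [PySem.Chars.replace]
  simp only [List.isEmpty_cons, Bool.false_eq_true, if_false]
  rw [replace_go_single l.length l [] le_rfl]
  simp

-- the per-character branch of A equals "lowercase, then 'a' to 'A'"
theorem char_step (c : Char) :
    (if c == 'a' || c == 'A' then PySem.Chars.upperChar c else PySem.Chars.lowerChar c)
      = (if PySem.Chars.lowerChar c = 'a' then 'A' else PySem.Chars.lowerChar c) := by
  by_cases h1 : c = 'a'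
  · subst h1; decide
  by_cases h2 : c = 'A'
  · subst h2; decide
  rw [if_neg (by simp [h1, h2])]
  have hla : PySem.Chars.lowerChar c ≠ 'a' := by
    unfold PySem.Chars.lowerChar
    split_ifs with hu
    · intro he
      have hu' : 'A' ≤ c ∧ c ≤ 'Z' := by
        simpa [PySem.Chars.isupper] using hu
      have hc1 : 65 ≤ c.toNat := hu'.1
      have hc2 : c.toNat ≤ 90 := hu'.2
      have hv : (c.toNat + 32).isValidChar := Or.inl (by omega)
      have h97 : c.toNat + 32 = 97 := by
        have hh := congrArg Char.toNat he
        rwa [Char.toNat_ofNat, if_pos hv, show ('a' : Char).toNat = 97 from rfl] at hh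
      have hA : c = 'A' := by
        calc c = Char.ofNat c.toNat := (Char.ofNat_toNat c).symm
        _ = Char.ofNat 65 := by rw [show c.toNat = 65 by omega]
        _ = 'A' := rfl
      exact h2 hA
    · exact h1
  rw [if_neg hla]

theorem foldl_step (l acc : List Char) :
    l.foldl (fun acc c => if c == 'a' || c == 'A' then acc ++ [PySem.Chars.upperChar c]
                          else acc ++ [PySem.Chars.lowerChar c]) acc
      = acc ++ l.map (fun c => if PySem.Chars.lowerChar c = 'a' then 'A'
                               else PySem.Chars.lowerChar c) := by
  induction l generalizing acc with
  | nil => simp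
  | cons c t ih =>
    simp only [List.foldl_cons, List.map_cons]
    rw [show (if c == 'a' || c == 'A' then acc ++ [PySem.Chars.upperChar c]
              else acc ++ [PySem.Chars.lowerChar c])
          = acc ++ [if c == 'a' || c == 'A' then PySem.Chars.upperChar c
                    else PySem.Chars.lowerChar c] by split <;> rfl]
    rw [ih, char_step]
    simp

-- ===== VERDICT (by name: the statement is the Claim_ definition above) =====
theorem solution_spec : Claim_equal_solution := by
  intro s _
  unfold Spec_solution solution solution_alt
  simp only [PySem.Str.replace, PySem.Str.lower, PySem.Chars.lower, String.toList_ofList]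
  apply congrArg String.ofList
  rw [show ("a" : String).toList = ['a'] from rfl, show ("A" : String).toList = ['A'] from rfl]
  rw [replace_single, List.map_map]
  have hfold := PySem.List.foldl_pyRange_zero_pyGetD' (xs := s.toList) (d := ' ')
    (f := fun acc c => if c == 'a' || c == 'A' then acc ++ [PySem.Chars.upperChar c]
                       else acc ++ [PySem.Chars.lowerChar c]) (init := ([] : List Char))
  simp only [PySem.Str.len_eq]
  rw [hfold, foldl_step]
  simp [Function.comp]
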